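-- pv_equiv track=rewrite | github.com/denisschmidt/leetcode | leetcode/graph/737. Sentence Similarity II/py/main.py | areSentencesSimilarTwo
-- ===== SOURCE A (Python) =====
-- from typing import List
--
-- def areSentencesSimilarTwo(words1: List[str], words2: List[str], pairs: List[List[str]]) -> bool:
--     if len(words1) != len(words2):
--         return False
--
--     parent = {}
--     n = len(words1)
--
--     def find(x):
--         if x not in parent:
--             parent[x] = x
--         if x != parent[x]:
--             parent[x] = find(parent[x])
--         return parent[x]
--
--     for pair in pairs:
--         root1 = find(pair[0])
--         root2 = find(pair[1])
--
--         if root1 != root2: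
--             parent[root2] = root1
--
--     for i in range(n):
--         if words1[i] == words2[i]:
--             continue
--
--         root1 = find(words1[i])
--         root2 = find(words2[i])
--
--         if root1 != root2:
--             return False
--
--     return True
-- ===== SOURCE B (Python) =====
-- from typing import List
--
-- def areSentencesSimilarTwo(words1: List[str], words2: List[str], pairs: List[List[str]]) -> bool:
--     if len(words1) != len(words2):
--         return False
--
--     # flat representative map: rep.get(w, w) is the representative of w's class
--     rep = {}
--     for pair in pairs:
--         a, b = pair[0], pair[1]
--         ra = rep.get(a, a)
--         rb = rep.get(b, b)
--         if ra != rb: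
--             # merge rb's class into ra's by relabelling every rb value
--             rep = {k: (ra if v == rb else v) for k, v in rep.items()}
--             rep[a] = ra
--             rep[rb] = ra
--
--     return all(u == v or rep.get(u, u) == rep.get(v, v)
--                for u, v in zip(words1, words2))
-- ===== Notes on version B (the rewrite author's own statement) =====
-- stated objective: alternative
-- what changed: Replaced the recursive path-compressing union-find (parent forest mutated by a recursive find) with a flat representative map merged by relabelling one class's values per pair, so queries are single dict lookups with no recursion.
import Mathlib
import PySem

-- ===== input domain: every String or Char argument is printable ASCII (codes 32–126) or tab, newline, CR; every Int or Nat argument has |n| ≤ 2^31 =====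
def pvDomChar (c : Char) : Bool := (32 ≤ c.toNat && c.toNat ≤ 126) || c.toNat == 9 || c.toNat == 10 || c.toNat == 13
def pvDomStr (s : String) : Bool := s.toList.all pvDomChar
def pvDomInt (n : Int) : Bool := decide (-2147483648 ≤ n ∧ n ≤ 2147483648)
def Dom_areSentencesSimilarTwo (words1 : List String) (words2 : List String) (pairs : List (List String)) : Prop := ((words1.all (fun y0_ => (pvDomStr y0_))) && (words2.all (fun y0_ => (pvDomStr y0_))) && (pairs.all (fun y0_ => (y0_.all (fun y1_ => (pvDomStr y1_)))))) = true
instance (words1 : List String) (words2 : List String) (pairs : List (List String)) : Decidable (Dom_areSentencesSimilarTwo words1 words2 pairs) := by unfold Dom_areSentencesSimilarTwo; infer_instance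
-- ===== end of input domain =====

-- ===== PORT A =====
-- B replaces A's recursive path-compressing union-find by a flat representative map
-- merged by relabelling; equivalence is proved for the return value on all inputs
-- where Python A returns (Pre_ excludes pairs shorter than 2, where A raises IndexError).

-- A's `find(x)`: recursive with path compression, mutating `parent`.
-- Fuel `parent.size + 2` always exceeds the parent-chain length (chains have distinct
-- keys), so the 0-fuel branch is never reached on any input; the proof shows this.
def pvFindLoop : Nat → PySem.Dict String String → String → PySem.Dict String String × String
  | 0, parent, x => (parent, x)
  | fuel+1, parent, x =>
    -- if x not in parent: parent[x] = x
    let parent1 := if parent.contains x then parent else parent.insert x x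
    let p := parent1.getD x x
    if x ≠ p then
      -- parent[x] = find(parent[x]); return parent[x]
      let r := pvFindLoop fuel parent1 p
      (r.1.insert x r.2, r.2)
    else (parent1, x)

def pvFind (parent : PySem.Dict String String) (x : String) :
    PySem.Dict String String × String :=
  pvFindLoop (parent.size + 2) parent x

-- one iteration of A's `for pair in pairs` loop; pair[0] / pair[1] via pyGet?
-- (the `.getD ""` arm is unreachable under Pre_, which excludes pairs of length < 2)
def pvUnionStep (parent : PySem.Dict String String) (pair : List String) :
    PySem.Dict String String :=
  let a := ((PySem.List.pyGet? pair 0).getD "")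
  let b := ((PySem.List.pyGet? pair 1).getD "")
  let f1 := pvFind parent a
  let f2 := pvFind f1.1 b
  if f1.2 ≠ f2.2 then f2.1.insert f2.2 f1.2 else f2.1

-- A's `for i in range(n)` query loop over words1[i], words2[i]; since n is the length
-- of BOTH lists, the visited pairs (words1[i], words2[i]) are exactly words1.zip words2.
def pvCheckLoop : List (String × String) → PySem.Dict String String → Bool
  | [], _ => true
  | (u, v) :: rest, parent =>
    if u = v then pvCheckLoop rest parent
    else
      let f1 := pvFind parent u
      let f2 := pvFind f1.1 v
      if f1.2 ≠ f2.2 then false else pvCheckLoop rest f2.1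

def areSentencesSimilarTwo (words1 : List String) (words2 : List String)
    (pairs : List (List String)) : Bool :=
  if words1.length ≠ words2.length then false
  else pvCheckLoop (words1.zip words2) (pairs.foldl pvUnionStep PySem.Dict.empty)

-- ===== PORT B =====
-- one iteration of B's merge loop: relabel every value equal to rb to ra
-- (the dict comprehension), then rep[a] = ra; rep[rb] = ra
def pvMergeStep (m : PySem.Dict String String) (pair : List String) :
    PySem.Dict String String :=
  let a := ((PySem.List.pyGet? pair 0).getD "")
  let b := ((PySem.List.pyGet? pair 1).getD "")
  let ra := m.getD a a
  let rb := m.getD b b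
  if ra ≠ rb then
    ((PySem.Dict.mk (m.items.map (fun kv => (kv.1, if kv.2 = rb then ra else kv.2)))).insert a ra).insert rb ra
  else m

def areSentencesSimilarTwo_alt (words1 : List String) (words2 : List String)
    (pairs : List (List String)) : Bool :=
  if words1.length ≠ words2.length then false
  else
    let m := pairs.foldl pvMergeStep PySem.Dict.empty
    (words1.zip words2).all (fun uv => uv.1 == uv.2 || m.getD uv.1 uv.1 == m.getD uv.2 uv.2)

-- ===== PRECONDITION & SPEC =====
-- Pre_ excludes exactly the inputs where Python A raises IndexError: equal-length word
-- lists together with some pair of fewer than 2 elements (A reads pair[0] and pair[1]).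
def Pre_areSentencesSimilarTwo (words1 : List String) (words2 : List String) (pairs : List (List String)) : Prop := words1.length = words2.length → ∀ p ∈ pairs, 2 ≤ p.length
instance (words1 : List String) (words2 : List String) (pairs : List (List String)) : Decidable (Pre_areSentencesSimilarTwo words1 words2 pairs) := by unfold Pre_areSentencesSimilarTwo; infer_instance
def pvWitness_areSentencesSimilarTwo : List String × List String × List (List String) :=
  (["great", "acting", "skills"], ["fine", "drama", "talent"],
   [["great", "good"], ["fine", "good"], ["acting", "drama"], ["skills", "talent"]])

def Spec_areSentencesSimilarTwo (words1 : List String) (words2 : List String) (pairs : List (List String)) (out : Bool) : Prop := out = areSentencesSimilarTwo_alt words1 words2 pairs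
instance (words1 : List String) (words2 : List String) (pairs : List (List String)) (out : Bool) : Decidable (Spec_areSentencesSimilarTwo words1 words2 pairs out) := by unfold Spec_areSentencesSimilarTwo; infer_instance

-- ===== CLAIM (what is proved, stated in full; the proofs are below) =====
def Claim_equal_areSentencesSimilarTwo : Prop := ∀ (words1 : List String) (words2 : List String) (pairs : List (List String)), Dom_areSentencesSimilarTwo words1 words2 pairs → Pre_areSentencesSimilarTwo words1 words2 pairs → Spec_areSentencesSimilarTwo words1 words2 pairs (areSentencesSimilarTwo words1 words2 pairs)

-- ===== LEMMAS AND PROOFS =====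

-- rep m x = rep.get(x, x): B's representative function
def pvRep (m : PySem.Dict String String) (x : String) : String := m.getD x x

-- The coupling invariant between A's parent forest d and B's flat map m:
-- (1) m is idempotent, (2) parent edges preserve the class, (3) the roots of d are
-- exactly the representatives of m, (4) rk strictly decreases along non-self edges
-- (so d is acyclic and chains have distinct keys).
def pvInv (d m : PySem.Dict String String) (rk : String → Nat) : Prop :=
  (∀ x, pvRep m (pvRep m x) = pvRep m x) ∧
  (∀ x p, d.get? x = some p → pvRep m p = pvRep m x) ∧
  (∀ x, pvRep m x = x ↔ (d.get? x = none ∨ d.get? x = some x)) ∧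
  (∀ x p, d.get? x = some p → p ≠ x → rk p < rk x)

-- inserting the edge x ↦ r, r a representative of x's class, preserves the invariant
lemma pvInv_insert (d m : PySem.Dict String String) (rk : String → Nat) (x r : String)
    (hInv : pvInv d m rk) (hx : pvRep m x = r) (hr : pvRep m r = r)
    (hrk : r = x ∨ rk r < rk x) : pvInv (d.insert x r) m rk := by
  obtain ⟨h1, h2, h3, h4⟩ := hInv
  refine ⟨h1, ?_, ?_, ?_⟩
  · intro y p hy
    rw [PySem.Dict.get?_insert] at hy
    split at hy
    · rename_i hyx; subst hyx
      injection hy with hpr; subst hpr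
      rw [hx]; exact hr
    · exact h2 y p hy
  · intro y
    rw [PySem.Dict.get?_insert]
    by_cases hyx : y = x
    · subst hyx
      rw [if_pos rfl]
      constructor
      · intro hxy
        have hry : r = y := hx.symm.trans hxy
        right; rw [hry]
      · rintro (h | h)
        · exact absurd h (by simp)
        · have hry : r = y := by injection h
          rw [hx, hry]
    · simp only [if_neg hyx]; exact h3 y
  · intro y p hy hpy
    rw [PySem.Dict.get?_insert] at hy
    split at hy
    · rename_i hyx; subst hyx
      injection hy with hpr; subst hpr
      rcases hrk with h | h
      · exact absurd h hpy
      · exact h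
    · exact h4 y p hy hpy

-- a filter for a strictly weaker predicate, missing a witness, is strictly shorter
lemma pvFilter_lt {α : Type} (P Q : α → Bool) (himp : ∀ a, P a = true → Q a = true) :
    ∀ (l : List α) (p : α), p ∈ l → Q p = true → P p = false →
    (l.filter P).length < (l.filter Q).length := by
  intro l
  induction l with
  | nil => intro p hp _ _; simp at hp
  | cons a t ih =>
    intro p hp hQ hP
    have hle : (t.filter P).length ≤ (t.filter Q).length := by
      rw [← List.countP_eq_length_filter, ← List.countP_eq_length_filter]
      exact List.countP_mono_left (fun a _ h => himp a h)
    rcases List.mem_cons.mp hp with rfl | hpt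
    · rw [List.filter_cons, List.filter_cons, if_pos hQ, if_neg (by simp [hP])]
      simp only [List.length_cons]
      omega
    · by_cases hPa : P a = true
      · rw [List.filter_cons, List.filter_cons, if_pos hPa, if_pos (himp a hPa)]
        simp only [List.length_cons]
        have := ih p hpt hQ hP
        omega
      · have h := ih p hpt hQ hP
        rw [List.filter_cons, List.filter_cons, if_neg hPa]
        by_cases hQa : Q a = true
        · rw [if_pos hQa]
          simp only [List.length_cons]
          omega
        · rw [if_neg hQa]
          exact h

-- the find spec: with enough fuel, find returns rep m x and preserves the invariant
lemma pvFind_spec (m : PySem.Dict String String) (rk : String → Nat) :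
    ∀ (fuel : Nat) (d : PySem.Dict String String) (x : String), pvInv d m rk →
    (d.keys.filter (fun k => rk k < rk x)).length + 2 ≤ fuel →
    (pvFindLoop fuel d x).2 = pvRep m x ∧ pvInv (pvFindLoop fuel d x).1 m rk ∧
    (pvRep m x = x ∨ rk (pvRep m x) < rk x) := by
  intro fuel
  induction fuel with
  | zero => intro d x _ hf; omega
  | succ f ih =>
    intro d x hInv hf
    obtain ⟨h1, h2, h3, h4⟩ := hInv
    by_cases hc : d.contains x = true
    · obtain ⟨p0, hp0⟩ : ∃ p0, d.get? x = some p0 := by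
        rw [PySem.Dict.contains_eq_isSome_get?] at hc
        cases hg : d.get? x with
        | none => rw [hg] at hc; simp at hc
        | some v => exact ⟨v, rfl⟩
      have hgetD : d.getD x x = p0 := by
        rw [PySem.Dict.getD_eq_get?_getD, hp0]; rfl
      by_cases hpx : p0 = x
      · -- x is a root of the parent forest
        have hrx : pvRep m x = x := (h3 x).mpr (Or.inr (by rw [hp0, hpx]))
        simp only [pvFindLoop, hc, if_true, hgetD, hpx, ne_eq, not_true_eq_false, if_false]
        exact ⟨hrx.symm, ⟨h1, h2, h3, h4⟩, Or.inl hrx⟩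
      · -- follow the parent edge x ↦ p0
        have hrkp : rk p0 < rk x := h4 x p0 hp0 hpx
        have hrepx : pvRep m x = pvRep m p0 := (h2 x p0 hp0).symm
        simp only [pvFindLoop, hc, if_true, hgetD, ne_eq]
        rw [if_pos (show ¬x = p0 from fun h => hpx h.symm)]
        by_cases hcp : d.contains p0 = true
        · -- p0 is itself a key: the filter measure strictly drops
          have hmem : p0 ∈ d.keys := by
            rw [← PySem.Dict.contains_iff_mem_keys]; exact hcp
          have hstrict : (d.keys.filter (fun k => decide (rk k < rk p0))).length
              < (d.keys.filter (fun k => decide (rk k < rk x))).length := by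
            refine pvFilter_lt _ _ ?_ d.keys p0 hmem (by simp [hrkp]) (by simp)
            intro a ha
            simp only [decide_eq_true_eq] at ha ⊢
            omega
          obtain ⟨hr2, hInv', hrk'⟩ := ih d p0 ⟨h1, h2, h3, h4⟩ (by omega)
          refine ⟨by rw [hr2, hrepx], ?_, ?_⟩
          · refine pvInv_insert _ _ _ _ _ hInv' (by rw [hrepx, ← hr2]) ?_ ?_
            · rw [hr2]; exact h1 p0
            · rw [hr2]
              rcases hrk' with h | h
              · right; rw [h]; exact hrkp
              · right; exact h.trans hrkp
          · rw [hrepx]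
            rcases hrk' with h | h
            · right; rw [h]; exact hrkp
            · right; exact h.trans hrkp
        · -- p0 is not a key: the recursive call returns immediately
          have hnone : d.get? p0 = none := by
            rw [PySem.Dict.contains_eq_isSome_get?] at hcp
            cases hg : d.get? p0 with
            | none => rfl
            | some v => rw [hg] at hcp; simp at hcp
          have hrp0 : pvRep m p0 = p0 := (h3 p0).mpr (Or.inl hnone)
          have hrepx' : pvRep m x = p0 := hrepx.trans hrp0
          obtain ⟨f', rfl⟩ : ∃ f', f = f' + 1 := ⟨f - 1, by omega⟩
          have heval : pvFindLoop (f' + 1) d p0 = (d.insert p0 p0, p0) := by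
            simp only [pvFindLoop, hcp, Bool.false_eq_true, if_false, PySem.Dict.getD_insert,
              if_true, ne_eq, not_true_eq_false]
          rw [heval]
          have inv1 : pvInv (d.insert p0 p0) m rk :=
            pvInv_insert d m rk p0 p0 ⟨h1, h2, h3, h4⟩ hrp0 hrp0 (Or.inl rfl)
          have inv2 : pvInv ((d.insert p0 p0).insert x p0) m rk :=
            pvInv_insert _ m rk x p0 inv1 hrepx' hrp0 (Or.inr hrkp)
          exact ⟨hrepx'.symm, inv2, Or.inr (by rw [hrepx']; exact hrkp)⟩
    · -- x is not in the parent dict: insert x ↦ x and return x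
      have hnone : d.get? x = none := by
        rw [PySem.Dict.contains_eq_isSome_get?] at hc
        cases hg : d.get? x with
        | none => rfl
        | some v => rw [hg] at hc; simp at hc
      have hrx : pvRep m x = x := (h3 x).mpr (Or.inl hnone)
      simp only [pvFindLoop, hc, Bool.false_eq_true, if_false, PySem.Dict.getD_insert,
        if_true, ne_eq, not_true_eq_false]
      exact ⟨hrx.symm, pvInv_insert d m rk x x ⟨h1, h2, h3, h4⟩ hrx hrx (Or.inl rfl), Or.inl hrx⟩

lemma pvFind_top (m : PySem.Dict String String) (rk : String → Nat)
    (d : PySem.Dict String String) (x : String) (hInv : pvInv d m rk) :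
    (pvFind d x).2 = pvRep m x ∧ pvInv (pvFind d x).1 m rk := by
  have hb : (d.keys.filter (fun k => rk k < rk x)).length + 2 ≤ d.size + 2 := by
    have hl : (d.keys.filter (fun k => decide (rk k < rk x))).length ≤ d.keys.length :=
      List.length_filter_le _ _
    have hk : d.keys.length = d.size := by simp [PySem.Dict.keys, PySem.Dict.size]
    omega
  have h := pvFind_spec m rk (d.size + 2) d x hInv hb
  exact ⟨h.1, h.2.1⟩

-- get? of the value-mapped dict comprehension
lemma pvGet?_mapVal (l : List (String × String)) (g : String → String) (x : String) :
    (PySem.Dict.mk (l.map (fun kv => (kv.1, g kv.2)))).get? x = ((PySem.Dict.mk l).get? x).map g := by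
  induction l with
  | nil => rfl
  | cons kv rest ih =>
    obtain ⟨k, v⟩ := kv
    simp only [List.map_cons, PySem.Dict.get?_mk_cons, ih]
    split <;> rfl

-- the value-relabelling comprehension, pointwise
lemma pvRep_merge (m : PySem.Dict String String) (a b ra rb : String)
    (hidem : ∀ x, pvRep m (pvRep m x) = pvRep m x)
    (hra : pvRep m a = ra) (hrb : pvRep m b = rb) (hne : ra ≠ rb) (x : String) :
    pvRep (((PySem.Dict.mk (m.items.map (fun kv => (kv.1, if kv.2 = rb then ra else kv.2)))).insert a ra).insert rb ra) x
      = if pvRep m x = rb then ra else pvRep m x := by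
  have hrb' : pvRep m rb = rb := by rw [← hrb]; exact hidem b
  have harb : a ≠ rb := fun h => hne (by rw [← hra, h, hrb'])
  simp only [pvRep] at hra hrb hrb' ⊢
  rw [PySem.Dict.getD_insert]
  by_cases hxrb : x = rb
  · subst hxrb
    rw [if_pos rfl, hrb', if_pos rfl]
  · rw [if_neg hxrb, PySem.Dict.getD_insert]
    by_cases hxa : x = a
    · subst hxa
      rw [if_pos rfl, hra, if_neg hne]
    · rw [if_neg hxa]
      have hmk : m = PySem.Dict.mk m.items := rfl
      cases hg : m.get? x with
      | none =>
        have hmap : (PySem.Dict.mk (m.items.map (fun kv => (kv.1, if kv.2 = rb then ra else kv.2)))).get? x = none := by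
          rw [pvGet?_mapVal m.items (fun v => if v = rb then ra else v) x, ← hmk, hg]; rfl
        rw [PySem.Dict.getD_eq_get?_getD, hmap, PySem.Dict.getD_eq_get?_getD, hg]
        simp [hxrb]
      | some v =>
        have hmap : (PySem.Dict.mk (m.items.map (fun kv => (kv.1, if kv.2 = rb then ra else kv.2)))).get? x = some (if v = rb then ra else v) := by
          rw [pvGet?_mapVal m.items (fun v => if v = rb then ra else v) x, ← hmk, hg]; rfl
        rw [PySem.Dict.getD_eq_get?_getD, hmap, PySem.Dict.getD_eq_get?_getD, hg]
        simp

-- linking root r2 under root r1 on A's side matches relabelling on B's side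
lemma pvInv_link (d m m' : PySem.Dict String String) (rk : String → Nat) (r1 r2 : String)
    (hInv : pvInv d m rk) (h1 : pvRep m r1 = r1) (h2 : pvRep m r2 = r2) (hne : r1 ≠ r2)
    (hm' : ∀ x, pvRep m' x = if pvRep m x = r2 then r1 else pvRep m x) :
    pvInv (d.insert r2 r1) m' (fun x => if pvRep m x = r2 then rk x + rk r1 + 1 else rk x) := by
  obtain ⟨hi1, hi2, hi3, hi4⟩ := hInv
  have hm'r1 : pvRep m' r1 = r1 := by rw [hm' r1, if_neg (by rw [h1]; exact hne), h1]
  refine ⟨?_, ?_, ?_, ?_⟩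
  · intro x
    rw [hm' x]
    by_cases hx : pvRep m x = r2
    · rw [if_pos hx]; exact hm'r1
    · rw [if_neg hx, hm' (pvRep m x), hi1 x, if_neg hx]
  · intro y p hy
    rw [PySem.Dict.get?_insert] at hy
    split at hy
    · rename_i hyr2; subst hyr2
      injection hy with hpr; subst hpr
      rw [hm'r1, hm' y, if_pos h2]
    · rename_i hyr2
      have hrep := hi2 y p hy
      rw [hm' p, hm' y, hrep]
  · intro y
    rw [PySem.Dict.get?_insert, hm' y]
    by_cases hyr2 : y = r2
    · subst hyr2
      rw [if_pos rfl, if_pos h2]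
      constructor
      · intro h; exact absurd h hne
      · rintro (h | h)
        · exact absurd h (by simp)
        · have hr12 : r1 = y := by injection h
          exact absurd hr12 hne
    · rw [if_neg hyr2]
      by_cases hy2 : pvRep m y = r2
      · rw [if_pos hy2]
        constructor
        · intro h
          -- h : r1 = y; then pvRep m r1 = pvRep m y = r2, contradicting h1 and r1 ≠ r2
          exfalso; apply hne
          rw [← h] at hy2
          rw [← h1]; exact hy2
        · intro h
          exfalso
          have : pvRep m y = y := (hi3 y).mpr h
          rw [this] at hy2; exact hyr2 hy2
      · rw [if_neg hy2]; exact hi3 y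
  · intro y p hy hpy
    rw [PySem.Dict.get?_insert] at hy
    split at hy
    · rename_i hyr2; subst hyr2
      injection hy with hpr; subst hpr
      simp only
      rw [if_pos h2, if_neg (by rw [h1]; exact hne)]
      omega
    · rename_i hyr2
      have hrep := hi2 y p hy
      simp only
      rw [hrep]
      by_cases hy2 : pvRep m y = r2
      · rw [if_pos hy2, if_pos hy2]
        have := hi4 y p hy hpy
        omega
      · rw [if_neg hy2, if_neg hy2]
        exact hi4 y p hy hpy

-- the two pair loops, run in parallel, keep the invariant
lemma pvFold_inv : ∀ (pairs : List (List String)) (d m : PySem.Dict String String)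
    (rk : String → Nat), pvInv d m rk →
    ∃ rk', pvInv (pairs.foldl pvUnionStep d) (pairs.foldl pvMergeStep m) rk' := by
  intro pairs
  induction pairs with
  | nil => intro d m rk h; exact ⟨rk, h⟩
  | cons pair rest ih =>
    intro d m rk hInv
    simp only [List.foldl_cons]
    have hidem := hInv.1
    have hA := pvFind_top m rk d ((PySem.List.pyGet? pair 0).getD "") hInv
    have hB := pvFind_top m rk (pvFind d ((PySem.List.pyGet? pair 0).getD "")).1
      ((PySem.List.pyGet? pair 1).getD "") hA.2
    by_cases heq : pvRep m ((PySem.List.pyGet? pair 0).getD "") = pvRep m ((PySem.List.pyGet? pair 1).getD "")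
    · have hstepA : pvUnionStep d pair = (pvFind (pvFind d ((PySem.List.pyGet? pair 0).getD "")).1 ((PySem.List.pyGet? pair 1).getD "")).1 := by
        simp only [pvUnionStep, hA.1, hB.1, ne_eq, heq, not_true_eq_false, if_false]
      have hstepB : pvMergeStep m pair = m := by
        simp only [pvRep] at heq
        simp only [pvMergeStep, ne_eq, heq, not_true_eq_false, if_false]
      rw [hstepA, hstepB]
      exact ih _ _ rk hB.2
    · have hm' := pvRep_merge m ((PySem.List.pyGet? pair 0).getD "") ((PySem.List.pyGet? pair 1).getD "")
        (pvRep m ((PySem.List.pyGet? pair 0).getD "")) (pvRep m ((PySem.List.pyGet? pair 1).getD ""))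
        hidem rfl rfl heq
      have hlink := pvInv_link _ m _ rk
        (pvRep m ((PySem.List.pyGet? pair 0).getD "")) (pvRep m ((PySem.List.pyGet? pair 1).getD ""))
        hB.2 (hidem _) (hidem _) heq hm'
      have hstepA : pvUnionStep d pair
          = (pvFind (pvFind d ((PySem.List.pyGet? pair 0).getD "")).1 ((PySem.List.pyGet? pair 1).getD "")).1.insert
              (pvRep m ((PySem.List.pyGet? pair 1).getD "")) (pvRep m ((PySem.List.pyGet? pair 0).getD "")) := by
        simp only [pvUnionStep, hA.1, hB.1, ne_eq]
        rw [if_pos heq]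
      have hstepB : pvMergeStep m pair
          = ((PySem.Dict.mk (m.items.map (fun kv => (kv.1, if kv.2 = pvRep m ((PySem.List.pyGet? pair 1).getD "") then pvRep m ((PySem.List.pyGet? pair 0).getD "") else kv.2)))).insert
              ((PySem.List.pyGet? pair 0).getD "") (pvRep m ((PySem.List.pyGet? pair 0).getD ""))).insert
              (pvRep m ((PySem.List.pyGet? pair 1).getD "")) (pvRep m ((PySem.List.pyGet? pair 0).getD "")) := by
        have heq' : ¬ m.getD ((PySem.List.pyGet? pair 0).getD "") ((PySem.List.pyGet? pair 0).getD "")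
            = m.getD ((PySem.List.pyGet? pair 1).getD "") ((PySem.List.pyGet? pair 1).getD "") := heq
        simp only [pvMergeStep, ne_eq]
        rw [if_pos heq']
        rfl
      rw [hstepA, hstepB]
      exact ih _ _ _ hlink

-- A's query loop equals B's all-check
lemma pvCheck_eq : ∀ (zs : List (String × String)) (d m : PySem.Dict String String)
    (rk : String → Nat), pvInv d m rk →
    pvCheckLoop zs d = zs.all (fun uv => uv.1 == uv.2 || m.getD uv.1 uv.1 == m.getD uv.2 uv.2) := by
  intro zs
  induction zs with
  | nil => intro d m rk h; rfl
  | cons uv rest ih =>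
    obtain ⟨u, v⟩ := uv
    intro d m rk hInv
    by_cases huv : u = v
    · subst huv
      simp only [pvCheckLoop, List.all_cons, beq_self_eq_true, Bool.true_or, Bool.true_and]
      exact ih d m rk hInv
    · have hA := pvFind_top m rk d u hInv
      have hB := pvFind_top m rk (pvFind d u).1 v hA.2
      simp only [pvCheckLoop, if_neg huv, List.all_cons, hA.1, hB.1, ne_eq]
      by_cases hr : pvRep m u = pvRep m v
      · rw [if_neg (not_not.mpr hr)]
        have hbeq : (m.getD u u == m.getD v v) = true := by
          simp only [pvRep] at hr; simp [hr]
        rw [ih _ m rk hB.2]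
        simp [hbeq]
      · rw [if_pos hr]
        have hbeq : (m.getD u u == m.getD v v) = false := by
          simp only [pvRep] at hr; simp [hr]
        have huvb : (u == v) = false := by simp [huv]
        simp [hbeq, huvb]

lemma pvInv_empty : pvInv PySem.Dict.empty PySem.Dict.empty (fun _ => 0) := by
  refine ⟨?_, ?_, ?_, ?_⟩
  · intro x; simp [pvRep]
  · intro x p h; rw [PySem.Dict.get?_empty] at h; cases h
  · intro x; simp [pvRep]
  · intro x p h; rw [PySem.Dict.get?_empty] at h; cases h

-- ===== VERDICT (by name: the statement is the Claim_ definition above) =====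
theorem areSentencesSimilarTwo_spec : Claim_equal_areSentencesSimilarTwo := by
  intro words1 words2 pairs _ _
  unfold Spec_areSentencesSimilarTwo areSentencesSimilarTwo areSentencesSimilarTwo_alt
  by_cases h : words1.length = words2.length
  · simp only [h, ne_eq, not_true_eq_false, if_false]
    obtain ⟨rk', hInv⟩ := pvFold_inv pairs PySem.Dict.empty PySem.Dict.empty (fun _ => 0) pvInv_empty
    exact pvCheck_eq (words1.zip words2) _ _ rk' hInv
  · simp [h]
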